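-- pv_equiv track=rewrite | github.com/DanielElisenberg/aoc2021 | day10/day10.py | completion_points_for_line
-- ===== SOURCE A (Python) =====
-- def completion_points_for_line(open_chunks: list) -> int:
--     point_for = {
--         "(": 1,
--         "[": 2,
--         "{": 3,
--         "<": 4
--     }
--     missing_characters = [
--         character for character in list(reversed(open_chunks))
--     ]
--     completion_points = 0
--     for character in missing_characters:
--         completion_points = completion_points * 5 + point_for[character]
--     return completion_points
-- ===== SOURCE B (Python) =====
-- def completion_points_for_line(open_chunks: list) -> int:
--     point_for = {
--         "(": 1,
--         "[": 2,
--         "{": 3,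
--         "<": 4
--     }
--     total = 0
--     w = 1
--     for character in open_chunks:
--         total += point_for[character] * w
--         w *= 5
--     return total
-- ===== Notes on version B (the rewrite author's own statement) =====
-- stated objective: alternative
-- what changed: Replaces the reversed-list copy plus reverse Horner accumulation by a single forward pass that maintains an explicit positional weight w (total += point_for[c]*w; w *= 5).
import Mathlib
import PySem

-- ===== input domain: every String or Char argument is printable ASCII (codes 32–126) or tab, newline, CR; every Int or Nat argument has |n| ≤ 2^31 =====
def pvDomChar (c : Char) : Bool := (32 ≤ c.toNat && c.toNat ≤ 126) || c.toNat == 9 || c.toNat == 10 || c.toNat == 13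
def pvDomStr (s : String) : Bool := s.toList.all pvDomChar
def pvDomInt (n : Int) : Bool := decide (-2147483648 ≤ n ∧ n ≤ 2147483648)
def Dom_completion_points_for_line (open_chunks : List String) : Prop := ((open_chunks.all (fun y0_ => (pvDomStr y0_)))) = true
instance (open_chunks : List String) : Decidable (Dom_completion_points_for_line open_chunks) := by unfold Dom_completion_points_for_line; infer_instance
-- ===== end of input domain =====

-- B drops the reversed-list copy and the Horner fold: one forward pass keeping an explicit
-- positional weight w (total += point_for[c]*w; w *= 5).  Objective: alternative decomposition.

-- ===== PORT A =====
-- the point table; dict lookup raises KeyError outside its keys (excluded by Pre_),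
-- so the .getD 0 default is never reached inside Pre_.
def pvPointFor : PySem.Dict String Int :=
  PySem.Dict.ofList [("(", 1), ("[", 2), ("{", 3), ("<", 4)]

def completion_points_for_line (open_chunks : List String) : Int :=
  let missing_characters := open_chunks.reverse
  missing_characters.foldl
    (fun completion_points character =>
      completion_points * 5 + (PySem.Dict.get? pvPointFor character).getD 0) 0

-- ===== PORT B =====
def completion_points_for_line_alt (open_chunks : List String) : Int :=
  (open_chunks.foldl
    (fun s character =>
      (s.1 + (PySem.Dict.get? pvPointFor character).getD 0 * s.2, s.2 * 5))
    ((0 : Int), (1 : Int))).1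

-- ===== PRECONDITION & SPEC =====
-- Pre_: every element is one of the four open-bracket strings; on anything else
-- Python A (and B) raises KeyError.
def Pre_completion_points_for_line (open_chunks : List String) : Prop :=
  ∀ c ∈ open_chunks, c = "(" ∨ c = "[" ∨ c = "{" ∨ c = "<"
instance (open_chunks : List String) : Decidable (Pre_completion_points_for_line open_chunks) := by
  unfold Pre_completion_points_for_line; infer_instance

def pvWitness_completion_points_for_line : List String := ["(", "[", "{", "<", "("]

def Spec_completion_points_for_line (open_chunks : List String) (out : Int) : Prop :=
  out = completion_points_for_line_alt open_chunks
instance (open_chunks : List String) (out : Int) : Decidable (Spec_completion_points_for_line open_chunks out) := by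
  unfold Spec_completion_points_for_line; infer_instance

-- ===== CLAIM =====
def Claim_equal_completion_points_for_line : Prop :=
  ∀ (open_chunks : List String), Dom_completion_points_for_line open_chunks →
    Pre_completion_points_for_line open_chunks →
    Spec_completion_points_for_line open_chunks (completion_points_for_line open_chunks)

-- ===== LEMMAS AND PROOFS =====
-- the weighted forward fold equals t + w * (reverse Horner fold)
theorem pv_weighted_eq_horner (xs : List String) : ∀ (t w : Int),
    (xs.foldl (fun s character =>
        (s.1 + (PySem.Dict.get? pvPointFor character).getD 0 * s.2, s.2 * 5)) (t, w)).1
      = t + w * (xs.reverse.foldl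
          (fun completion_points character =>
            completion_points * 5 + (PySem.Dict.get? pvPointFor character).getD 0) 0) := by
  induction xs with
  | nil => intro t w; simp
  | cons x xs ih =>
    intro t w
    simp only [List.foldl_cons, List.reverse_cons, List.foldl_append, List.foldl_cons,
      List.foldl_nil, ih]
    ring

-- ===== VERDICT =====
theorem completion_points_for_line_spec : Claim_equal_completion_points_for_line := by
  intro xs _ _
  unfold Spec_completion_points_for_line completion_points_for_line completion_points_for_line_alt
  rw [pv_weighted_eq_horner]
  ring
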